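-- pv_equiv track=rewrite | github.com/LucVanw/AdventOfCode2025 | 08/solution.py | solve
-- ===== SOURCE A (Python) =====
-- def solve(input_data, connection_limit):
--     points = []
--     for line in input_data.strip().split('\n'):
--         if not line.strip(): continue
--         x, y, z = map(int, line.strip().split(','))
--         points.append((x, y, z))
--
--     n = len(points)
--     pairs = []
--
--     # Calculate all pairwise distances
--     for i in range(n):
--         for j in range(i + 1, n):
--             p1 = points[i]
--             p2 = points[j]
--             # Squared Euclidean distance is sufficient for sorting
--             dist_sq = (p1[0]-p2[0])**2 + (p1[1]-p2[1])**2 + (p1[2]-p2[2])**2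
--             pairs.append((dist_sq, i, j))
--
--     # Sort by distance
--     pairs.sort(key=lambda x: x[0])
--
--     # Union-Find / DSU
--     parent = list(range(n))
--     size = [1] * n
--
--     def find(i):
--         if parent[i] == i:
--             return i
--         parent[i] = find(parent[i])
--         return parent[i]
--
--     def union(i, j):
--         root_i = find(i)
--         root_j = find(j)
--         if root_i != root_j:
--             # Union by size
--             if size[root_i] < size[root_j]:
--                 root_i, root_j = root_j, root_i
--             parent[root_j] = root_i
--             size[root_i] += size[root_j]
--             return True
--         return False
--
--     # Connect top K pairs
--     count_connected = 0
--     for dist, u, v in pairs: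
--         if count_connected >= connection_limit:
--             break
--         union(u, v)
--         count_connected += 1
--
--     # Get circuit sizes
--     circuit_sizes = []
--     for i in range(n):
--         if parent[i] == i:
--             circuit_sizes.append(size[i])
--
--     circuit_sizes.sort(reverse=True)
--
--     if len(circuit_sizes) < 3:
--         return 0
--
--     return circuit_sizes[0] * circuit_sizes[1] * circuit_sizes[2]
-- ===== SOURCE B (Python) =====
-- def solve(input_data, connection_limit):
--     points = [tuple(int(t) for t in line.strip().split(','))
--               for line in input_data.strip().split('\n') if line.strip()]
--     n = len(points)
--     edges = sorted((((points[i][0]-points[j][0])**2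
--                      + (points[i][1]-points[j][1])**2
--                      + (points[i][2]-points[j][2])**2, i, j)
--                     for i in range(n) for j in range(i + 1, n)),
--                    key=lambda t: t[0])
--
--     # label propagation: labels[i] is the component label of point i
--     labels = list(range(n))
--     for _, u, v in edges[:max(0, connection_limit)]:
--         lu, lv = labels[u], labels[v]
--         if lu != lv:
--             labels = [lu if l == lv else l for l in labels]
--
--     sizes = [labels.count(l) for l in range(n) if l in labels]
--     sizes.sort(reverse=True)
--     if len(sizes) < 3:
--         return 0
--     return sizes[0] * sizes[1] * sizes[2]
-- ===== Notes on version B (the rewrite author's own statement) =====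
-- stated objective: alternative
-- what changed: Replaces the union-find (path compression + union by size) with label propagation over a flat labels array (merging relabels one class), builds points/edges by comprehensions with a sort-then-slice instead of a counted break loop, and counts component sizes directly from the labels.
import Mathlib
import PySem

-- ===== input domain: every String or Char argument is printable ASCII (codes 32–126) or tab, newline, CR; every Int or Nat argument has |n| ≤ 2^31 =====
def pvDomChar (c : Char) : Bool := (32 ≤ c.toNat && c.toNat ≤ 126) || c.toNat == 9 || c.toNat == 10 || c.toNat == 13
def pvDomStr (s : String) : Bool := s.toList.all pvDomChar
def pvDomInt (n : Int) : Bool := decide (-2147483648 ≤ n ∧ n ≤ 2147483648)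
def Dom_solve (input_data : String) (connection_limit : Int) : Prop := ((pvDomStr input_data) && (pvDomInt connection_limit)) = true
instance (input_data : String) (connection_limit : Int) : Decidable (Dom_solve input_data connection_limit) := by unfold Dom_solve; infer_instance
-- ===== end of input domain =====

-- B replaces A's union-find (path compression + union by size) with label propagation over a
-- flat labels list and counts component sizes directly from the labels; objective: alternative
-- (same asymptotic cost, dominated by the O(n^2) edge list in both).

-- ===== PORT A =====

def parseLineA (line : List Char) : Option (Int × Int × Int) :=
  -- x, y, z = map(int, line.strip().split(','))  (none = ValueError)
  match PySem.Chars.splitOn (PySem.Chars.strip line) [','] with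
  | [a, b, c] =>
    match PySem.Int.ofStr? (String.ofList a), PySem.Int.ofStr? (String.ofList b), PySem.Int.ofStr? (String.ofList c) with
    | some x, some y, some z => some (x, y, z)
    | _, _, _ => none
  | _ => none

def parsePointsA (lines : List (List Char)) : Option (List (Int × Int × Int)) :=
  lines.foldl (fun acc line =>
    match acc with
    | none => none
    | some pts =>
      if PySem.Chars.strip line = [] then some pts
      else
        match parseLineA line with
        | some p => some (pts ++ [p])
        | none => none) (some [])

def buildPairsA (points : List (Int × Int × Int)) (n : Nat) : List (Int × Nat × Nat) :=
  (List.range n).foldl (fun acc i =>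
    (List.range' (i + 1) (n - (i + 1))).foldl (fun acc2 j =>
      let p1 := points.getD i (0, 0, 0)
      let p2 := points.getD j (0, 0, 0)
      acc2 ++ [((p1.1 - p2.1) ^ 2 + (p1.2.1 - p2.2.1) ^ 2 + (p1.2.2 - p2.2.2) ^ 2, i, j)]) acc) []

-- find with path compression; fuel = array size is always enough (proved below), 0-fuel returns i
def findA : Nat → Array Nat → Nat → Array Nat × Nat
  | 0, q, i => (q, i)
  | fuel + 1, q, i =>
    if q.getD i i = i then (q, i)
    else
      let res := findA fuel q (q.getD i i)
      (res.1.setIfInBounds i res.2, res.2)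

def unionA (q : Array Nat) (s : Array Int) (u v : Nat) : Array Nat × Array Int :=
  let f1 := findA q.size q u
  let q1 := f1.1
  let ru := f1.2
  let f2 := findA q1.size q1 v
  let q2 := f2.1
  let rv := f2.2
  if ru ≠ rv then
    let pr := if s.getD ru 0 < s.getD rv 0 then (rv, ru) else (ru, rv)
    (q2.setIfInBounds pr.2 pr.1, s.setIfInBounds pr.1 (s.getD pr.1 0 + s.getD pr.2 0))
  else (q2, s)

def connectA : List (Int × Nat × Nat) → Array Nat → Array Int → Int → Int → Array Nat × Array Int
  | [], q, s, _, _ => (q, s)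
  | e :: rest, q, s, cnt, lim =>
    if lim ≤ cnt then (q, s)
    else
      let r := unionA q s e.2.1 e.2.2
      connectA rest r.1 r.2 (cnt + 1) lim

def solve (input_data : String) (connection_limit : Int) : Int :=
  match parsePointsA (PySem.Chars.splitOn (PySem.Chars.strip input_data.toList) ['\n']) with
  | none => 0  -- Python raises here; excluded by Pre_solve
  | some points =>
    let n := points.length
    let pairsS := PySem.List.sorted (buildPairsA points n) (fun t => t.1)
    let res := connectA pairsS (Array.range n) (Array.replicate n (1 : Int)) 0 connection_limit
    let circuit := (List.range n).foldl
      (fun acc i => if res.1.getD i i = i then acc ++ [res.2.getD i 0] else acc) []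
    let sortedS := PySem.List.sorted circuit (fun x => x) true
    if sortedS.length < 3 then 0
    else sortedS.getD 0 0 * sortedS.getD 1 0 * sortedS.getD 2 0

-- ===== PORT B =====

def parseLineB (line : List Char) : Option (Int × Int × Int) :=
  -- tuple(int(t) for t in line.strip().split(','))
  match (PySem.Chars.splitOn (PySem.Chars.strip line) [',']).mapM
      (fun p => PySem.Int.ofStr? (String.ofList p)) with
  | some [x, y, z] => some (x, y, z)
  | _ => none

def parsePointsB (lines : List (List Char)) : Option (List (Int × Int × Int)) :=
  (lines.filter (fun l => !(PySem.Chars.strip l).isEmpty)).mapM parseLineB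

def buildPairsB (points : List (Int × Int × Int)) (n : Nat) : List (Int × Nat × Nat) :=
  (List.range n).flatMap (fun i =>
    (List.range' (i + 1) (n - (i + 1))).map (fun j =>
      (((points.getD i (0, 0, 0)).1 - (points.getD j (0, 0, 0)).1) ^ 2 +
       ((points.getD i (0, 0, 0)).2.1 - (points.getD j (0, 0, 0)).2.1) ^ 2 +
       ((points.getD i (0, 0, 0)).2.2 - (points.getD j (0, 0, 0)).2.2) ^ 2, i, j)))

def mergeB (L : List Nat) (u v : Nat) : List Nat :=
  let lu := L.getD u 0
  let lv := L.getD v 0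
  if lu = lv then L else L.map (fun l => if l = lv then lu else l)

def solve_alt (input_data : String) (connection_limit : Int) : Int :=
  match parsePointsB (PySem.Chars.splitOn (PySem.Chars.strip input_data.toList) ['\n']) with
  | none => 0
  | some points =>
    let n := points.length
    let edges := PySem.List.sorted (buildPairsB points n) (fun t => t.1)
    let sel := PySem.List.slice edges none (some (max 0 connection_limit))
    let labels := sel.foldl (fun L e => mergeB L e.2.1 e.2.2) (List.range n)
    let sizes := (List.range n).filterMap
      (fun l => if l ∈ labels then some ((labels.count l : Int)) else none)
    let sortedS := PySem.List.sorted sizes (fun x => x) true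
    if sortedS.length < 3 then 0
    else sortedS.getD 0 0 * sortedS.getD 1 0 * sortedS.getD 2 0

-- ===== PRECONDITION & SPEC =====

-- Pre_solve excludes exactly the inputs where A raises ValueError: a non-blank line whose
-- comma-split does not have exactly 3 int()-parseable fields.
def Pre_solve (input_data : String) (connection_limit : Int) : Prop :=
  ∀ line ∈ PySem.Chars.splitOn (PySem.Chars.strip input_data.toList) ['\n'],
    PySem.Chars.strip line ≠ [] →
      (PySem.Chars.splitOn (PySem.Chars.strip line) [',']).length = 3 ∧
      ∀ p ∈ PySem.Chars.splitOn (PySem.Chars.strip line) [','],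
        (PySem.Int.ofStr? (String.ofList p)).isSome

instance (input_data : String) (connection_limit : Int) : Decidable (Pre_solve input_data connection_limit) := by
  unfold Pre_solve; infer_instance

def pvWitness_solve : String × Int := ("1,2,3\n4,5,6\n7,8,9\n10,11,12", 2)

def Spec_solve (input_data : String) (connection_limit : Int) (out : Int) : Prop := out = solve_alt input_data connection_limit
instance (input_data : String) (connection_limit : Int) (out : Int) : Decidable (Spec_solve input_data connection_limit out) := by unfold Spec_solve; infer_instance

-- ===== CLAIM (what is proved, stated in full; the proofs are below) =====
def Claim_equal_solve : Prop := ∀ (input_data : String) (connection_limit : Int), Dom_solve input_data connection_limit → Pre_solve input_data connection_limit → Spec_solve input_data connection_limit (solve input_data connection_limit)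

-- ===== LEMMAS AND PROOFS =====

-- ---- Section 1: parsing ----

theorem parseLine_ok (line : List Char)
    (h3 : (PySem.Chars.splitOn (PySem.Chars.strip line) [',']).length = 3)
    (hall : ∀ p ∈ PySem.Chars.splitOn (PySem.Chars.strip line) [','],
      (PySem.Int.ofStr? (String.ofList p)).isSome) :
    parseLineB line = parseLineA line ∧ (parseLineA line).isSome := by
  unfold parseLineA parseLineB
  rcases hp : PySem.Chars.splitOn (PySem.Chars.strip line) [','] with _ | ⟨a, _ | ⟨b, _ | ⟨c, _ | ⟨d, t⟩⟩⟩⟩ <;>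
    rw [hp] at h3 <;> simp at h3
  rw [hp] at hall
  obtain ⟨x, hae⟩ := Option.isSome_iff_exists.mp (hall a (by simp))
  obtain ⟨y, hbe⟩ := Option.isSome_iff_exists.mp (hall b (by simp))
  obtain ⟨z, hce⟩ := Option.isSome_iff_exists.mp (hall c (by simp))
  simp at hae hbe hce
  simp [hae, hbe, hce, List.mapM_cons, List.mapM_nil]

theorem parsePointsA_aux (ls : List (List Char))
    (hh : ∀ line ∈ ls, PySem.Chars.strip line ≠ [] →
      (PySem.Chars.splitOn (PySem.Chars.strip line) [',']).length = 3 ∧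
      ∀ p ∈ PySem.Chars.splitOn (PySem.Chars.strip line) [','],
        (PySem.Int.ofStr? (String.ofList p)).isSome) :
    ∀ pts : List (Int × Int × Int),
      ls.foldl (fun acc line =>
        match acc with
        | none => none
        | some pts =>
          if PySem.Chars.strip line = [] then some pts
          else
            match parseLineA line with
            | some p => some (pts ++ [p])
            | none => none) (some pts)
        = (parsePointsB ls).map (pts ++ ·) := by
  induction ls with
  | nil => intro pts; simp [parsePointsB, List.mapM_nil]
  | cons l t ih =>
    intro pts
    by_cases hbl : PySem.Chars.strip l = []
    · rw [List.foldl_cons]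
      have hstep : (match (some pts : Option (List (Int × Int × Int))) with
          | none => none
          | some pts =>
            if PySem.Chars.strip l = [] then some pts
            else
              match parseLineA l with
              | some p => some (pts ++ [p])
              | none => none) = some pts := by
        simp [hbl]
      rw [hstep, ih (fun x hx => hh x (List.mem_cons_of_mem _ hx)) pts]
      have : parsePointsB (l :: t) = parsePointsB t := by
        simp [parsePointsB, List.filter_cons, hbl]
      rw [this]
    · obtain ⟨h3, hall⟩ := hh l (by simp) hbl
      obtain ⟨hBA, hsome⟩ := parseLine_ok l h3 hall
      rcases hA : parseLineA l with _ | p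
      · rw [hA] at hsome; simp at hsome
      · rw [List.foldl_cons]
        have hstep : (match (some pts : Option (List (Int × Int × Int))) with
            | none => none
            | some pts =>
              if PySem.Chars.strip l = [] then some pts
              else
                match parseLineA l with
                | some p => some (pts ++ [p])
                | none => none) = some (pts ++ [p]) := by
          simp [hbl, hA]
        rw [hstep, ih (fun x hx => hh x (List.mem_cons_of_mem _ hx)) (pts ++ [p])]
        have hB : parsePointsB (l :: t) = (parsePointsB t).map (p :: ·) := by
          simp only [parsePointsB, List.filter_cons]
          have hnb : (!(PySem.Chars.strip l).isEmpty) = true := by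
            simp [List.isEmpty_iff, hbl]
          rw [hnb]
          simp only [if_true, List.mapM_cons, hBA, hA, Option.bind_some]
          rcases (t.filter (fun l => !(PySem.Chars.strip l).isEmpty)).mapM parseLineB with _ | zs <;> simp
        rw [hB]
        rcases parsePointsB t with _ | zs <;> simp

theorem parsePoints_eq (lines : List (List Char))
    (h : ∀ line ∈ lines, PySem.Chars.strip line ≠ [] →
      (PySem.Chars.splitOn (PySem.Chars.strip line) [',']).length = 3 ∧
      ∀ p ∈ PySem.Chars.splitOn (PySem.Chars.strip line) [','],
        (PySem.Int.ofStr? (String.ofList p)).isSome) :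
    parsePointsA lines = parsePointsB lines := by
  unfold parsePointsA
  rw [parsePointsA_aux lines h []]
  rcases parsePointsB lines with _ | zs <;> simp

-- ---- Section 2: pair list ----

theorem buildPairs_eq (points : List (Int × Int × Int)) (n : Nat) :
    buildPairsA points n = buildPairsB points n := by
  unfold buildPairsA buildPairsB
  simp only [PySem.List.foldl_append_singleton_eq_map, PySem.List.foldl_append_eq_flatMap,
    List.nil_append]

-- ---- Section 3: the break loop is a take-fold ----

theorem connectA_eq_take :
    ∀ (l : List (Int × Nat × Nat)) (q : Array Nat) (s : Array Int) (cnt lim : Int),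
      connectA l q s cnt lim =
        (l.take (lim - cnt).toNat).foldl (fun st e => unionA st.1 st.2 e.2.1 e.2.2) (q, s) := by
  intro l
  induction l with
  | nil => intro q s cnt lim; simp [connectA]
  | cons e rest ih =>
    intro q s cnt lim
    by_cases hc : lim ≤ cnt
    · have : (lim - cnt).toNat = 0 := by omega
      simp [connectA, hc, this]
    · have : (lim - cnt).toNat = (lim - (cnt + 1)).toNat + 1 := by omega
      simp only [connectA, if_neg hc, this, List.take_succ_cons, List.foldl_cons]
      exact ih _ _ (cnt + 1) lim

-- ---- Section 4: union-find theory ----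

def pg (q : Array Nat) (x : Nat) : Nat := q.getD x x

def itp (q : Array Nat) : Nat → Nat → Nat
  | 0, x => x
  | k + 1, x => itp q k (pg q x)

def isRt (q : Array Nat) (x : Nat) : Prop := pg q x = x

def RootR (q : Array Nat) (x r : Nat) : Prop := ∃ k, itp q k x = r ∧ isRt q r

theorem itp_fix (q : Array Nat) (r : Nat) (h : isRt q r) : ∀ k, itp q k r = r := by
  intro k
  induction k with
  | zero => rfl
  | succ k ih => show itp q k (pg q r) = r; rw [h]; exact ih

theorem itp_add (q : Array Nat) : ∀ (a c x : Nat), itp q (a + c) x = itp q c (itp q a x) := by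
  intro a
  induction a with
  | zero => intro c x; simp [itp]
  | succ a ih =>
    intro c x
    have : a + 1 + c = (a + c) + 1 := by omega
    rw [this]
    show itp q (a + c) (pg q x) = itp q c (itp q a (pg q x))
    exact ih c (pg q x)

theorem fix_mono (q : Array Nat) (x : Nat) {k m : Nat} (hk : isRt q (itp q k x)) (hkm : k ≤ m) :
    itp q m x = itp q k x ∧ isRt q (itp q m x) := by
  have : m = k + (m - k) := by omega
  rw [this, itp_add]
  rw [itp_fix q _ hk]
  exact ⟨rfl, hk⟩

theorem root_unique (q : Array Nat) (x r r' : Nat)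
    (h1 : RootR q x r) (h2 : RootR q x r') : r = r' := by
  obtain ⟨a, ha, hra⟩ := h1
  obtain ⟨b, hb, hrb⟩ := h2
  rcases le_total a b with h | h
  · have := fix_mono q x (ha ▸ hra) h
    rw [hb, ha] at this
    exact this.1.symm
  · have := fix_mono q x (hb ▸ hrb) h
    rw [ha, hb] at this
    exact this.1

theorem pg_set (q : Array Nat) (i v x : Nat) :
    pg (q.setIfInBounds i v) x = if x = i ∧ i < q.size then v else pg q x := by
  unfold pg
  rw [Array.getD_eq_getD_getElem?, Array.getD_eq_getD_getElem?, Array.getElem?_setIfInBounds]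
  by_cases h1 : i = x
  · subst h1
    by_cases h2 : i < q.size <;> simp [h2]
  · have h1' : ¬ x = i := fun h => h1 h.symm
    simp [h1, h1']

theorem pg_oob (q : Array Nat) (x : Nat) (h : ¬ x < q.size) : pg q x = x := by
  unfold pg
  rw [Array.getD_eq_getD_getElem?, Array.getElem?_eq_none_iff.mpr (Nat.le_of_not_lt h)]
  rfl

theorem itp_lt (q : Array Nat) (n : Nat) (hn : q.size = n)
    (hb : ∀ y, y < n → pg q y < n) : ∀ (k x : Nat), x < n → itp q k x < n := by
  intro k
  induction k with
  | zero => intro x hx; exact hx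
  | succ k ih =>
    intro x hx
    exact ih (pg q x) (hb x hx)

-- path compression step: q' = q.set i r where r is i's root
theorem cmp_set (q : Array Nat) (i r : Nat)
    (hi : i < q.size) (hir : RootR q i r) (hnr : ¬ isRt q i) (hr : isRt q r) :
    (∀ x k, isRt q (itp q k x) → itp (q.setIfInBounds i r) k x = itp q k x ∧
        isRt (q.setIfInBounds i r) (itp (q.setIfInBounds i r) k x)) ∧
    (∀ y, isRt (q.setIfInBounds i r) y ↔ isRt q y) := by
  have hri : r ≠ i := by rintro rfl; exact hnr hr
  set q' := q.setIfInBounds i r with hq'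
  have hroot : ∀ y, isRt q' y ↔ isRt q y := by
    intro y
    unfold isRt
    rw [hq', pg_set]
    by_cases hy : y = i ∧ i < q.size
    · obtain ⟨rfl, hlt⟩ := hy
      rw [if_pos ⟨rfl, hlt⟩]
      unfold isRt at hnr
      constructor
      · intro h; exact absurd rfl (h ▸ hri)
      · intro h; exact absurd h hnr
    · rw [if_neg hy]
  refine ⟨?_, hroot⟩
  intro x k
  induction k generalizing x with
  | zero =>
    intro h
    exact ⟨rfl, (hroot x).mpr h⟩
  | succ k ih =>
    intro h
    by_cases hxi : x = i
    · subst hxi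
      have hrx : itp q (k + 1) x = r := by
        apply root_unique q x _ _ ⟨k + 1, rfl, h⟩ hir
      have hstep : pg q' x = r := by
        rw [hq', pg_set, if_pos ⟨rfl, hi⟩]
      have hrq' : isRt q' r := (hroot r).mpr hr
      constructor
      · show itp q' k (pg q' x) = itp q (k + 1) x
        rw [hstep, hrx, itp_fix q' r hrq']
      · show isRt q' (itp q' k (pg q' x))
        rw [hstep, itp_fix q' r hrq']
        exact hrq'
    · have hstep : pg q' x = pg q x := by
        rw [hq', pg_set]
        simp [hxi]
      have h' : isRt q (itp q k (pg q x)) := h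
      obtain ⟨h1, h2⟩ := ih (pg q x) h'
      constructor
      · show itp q' k (pg q' x) = itp q k (pg q x)
        rw [hstep, h1]
      · show isRt q' (itp q' k (pg q' x))
        rw [hstep]
        exact h2

-- union step: q' = q.set b a for two distinct roots a, b
theorem mrg_avoid (q : Array Nat) (a b : Nat) (ha : isRt q a) (hb : isRt q b) (hab : a ≠ b) :
    ∀ (k x r : Nat), itp q k x = r → isRt q r → r ≠ b →
      itp (q.setIfInBounds b a) k x = r ∧ isRt (q.setIfInBounds b a) r := by
  have hpr : ∀ y, y ≠ b → pg (q.setIfInBounds b a) y = pg q y := by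
    intro y hy
    rw [pg_set]
    simp [hy]
  intro k
  induction k with
  | zero =>
    rintro x r rfl hr hrb
    refine ⟨rfl, ?_⟩
    unfold isRt
    rw [hpr _ hrb]
    exact hr
  | succ k ih =>
    intro x r h hr hrb
    by_cases hxb : x = b
    · exfalso
      have hfb : itp q (k + 1) x = b := by rw [hxb]; exact itp_fix q b hb (k + 1)
      rw [h] at hfb
      exact hrb hfb
    · have hstep : pg (q.setIfInBounds b a) x = pg q x := hpr x hxb
      have h' : itp q k (pg q x) = r := h
      obtain ⟨h1, h2⟩ := ih (pg q x) r h' hr hrb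
      constructor
      · show itp (q.setIfInBounds b a) k (pg (q.setIfInBounds b a) x) = r
        rw [hstep, h1]
      · exact h2

theorem mrg_to_a (q : Array Nat) (a b : Nat) (ha : isRt q a) (hb : isRt q b) (hab : a ≠ b)
    (hbs : b < q.size) :
    isRt (q.setIfInBounds b a) a ∧
    ∀ (k x : Nat), itp q k x = b → itp (q.setIfInBounds b a) (k + 1) x = a := by
  set q' := q.setIfInBounds b a with hq'
  have hra' : isRt q' a := by
    unfold isRt
    rw [hq', pg_set]
    have : ¬ (a = b ∧ b < q.size) := fun hc => hab hc.1
    rw [if_neg this]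
    exact ha
  refine ⟨hra', ?_⟩
  intro k
  induction k with
  | zero =>
    rintro x rfl
    show itp q' 0 (pg q' x) = a
    rw [hq', pg_set, if_pos ⟨rfl, hbs⟩]
    rfl
  | succ k ih =>
    intro x h
    by_cases hxb : x = b
    · show itp q' (k + 1) (pg q' x) = a
      rw [hq', pg_set, if_pos ⟨hxb, hbs⟩]
      exact itp_fix q' a hra' (k + 1)
    · show itp q' (k + 1) (pg q' x) = a
      rw [hq', pg_set]
      have : ¬ (x = b ∧ b < q.size) := fun hc => hxb hc.1
      rw [if_neg this]
      exact ih (pg q x) h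

theorem mrg_roots (q : Array Nat) (a b : Nat) (hab : a ≠ b) (hbs : b < q.size) :
    ∀ y, isRt (q.setIfInBounds b a) y ↔ (isRt q y ∧ y ≠ b) := by
  intro y
  unfold isRt
  rw [pg_set]
  by_cases hy : y = b
  · subst hy
    rw [if_pos ⟨rfl, hbs⟩]
    constructor
    · intro h; exact absurd rfl (h ▸ hab)
    · intro h; exact absurd rfl h.2
  · rw [if_neg (fun hc => hy hc.1)]
    simp [hy]

theorem find_ok : ∀ (fuel : Nat) (q : Array Nat) (i : Nat),
    isRt q (itp q fuel i) →
    (∀ y, y < q.size → pg q y < q.size) →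
    (findA fuel q i).2 = itp q fuel i ∧
    (findA fuel q i).1.size = q.size ∧
    (∀ x k, isRt q (itp q k x) →
      itp (findA fuel q i).1 k x = itp q k x ∧
      isRt (findA fuel q i).1 (itp (findA fuel q i).1 k x)) ∧
    (∀ y, isRt (findA fuel q i).1 y ↔ isRt q y) ∧
    (∀ y, y < (findA fuel q i).1.size → pg (findA fuel q i).1 y < (findA fuel q i).1.size) := by
  intro fuel
  induction fuel with
  | zero =>
    intro q i hfix hqb
    exact ⟨rfl, rfl, fun x k h => ⟨rfl, h⟩, fun y => Iff.rfl, hqb⟩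
  | succ fuel ih =>
    intro q i hfix hqb
    by_cases hri : q.getD i i = i
    · have hrt : isRt q i := hri
      have hval : itp q (fuel + 1) i = i := itp_fix q i hrt (fuel + 1)
      have hfa : findA (fuel + 1) q i = (q, i) := by
        simp only [findA, if_pos hri]
      rw [hfa]
      exact ⟨hval.symm, rfl, fun x k h => ⟨rfl, h⟩, fun y => Iff.rfl, hqb⟩
    · have hnrt : ¬ isRt q i := hri
      have hii : i < q.size := by
        by_contra hc
        exact hri (pg_oob q i hc)
      have hfix' : isRt q (itp q fuel (pg q i)) := hfix
      obtain ⟨ihr, ihsz, ihc, ihrt, ihb⟩ := ih q (pg q i) hfix' hqb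
      have hfa : findA (fuel + 1) q i =
          ((findA fuel q (pg q i)).1.setIfInBounds i (findA fuel q (pg q i)).2,
           (findA fuel q (pg q i)).2) := by
        simp only [findA, if_neg hri]
        rfl
      set q1 := (findA fuel q (pg q i)).1 with hq1
      set r := (findA fuel q (pg q i)).2 with hrdef
      have hrval : r = itp q (fuel + 1) i := ihr
      have hrrt : isRt q r := hrval ▸ hfix
      have hRq1 : RootR q1 i r := by
        obtain ⟨h1, h2⟩ := ihc i (fuel + 1) (by rw [← hrval]; exact hrrt)
        refine ⟨fuel + 1, ?_, ?_⟩
        · rw [h1, ← hrval]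
        · rw [h1, ← hrval] at h2
          exact h2
      have hnrt1 : ¬ isRt q1 i := fun h => hnrt ((ihrt i).mp h)
      have hrt1 : isRt q1 r := (ihrt r).mpr hrrt
      have hi1 : i < q1.size := by rw [ihsz]; exact hii
      obtain ⟨hcmp, hcrt⟩ := cmp_set q1 i r hi1 hRq1 hnrt1 hrt1
      have hrlt : r < q.size := by
        rw [hrval]
        exact itp_lt q q.size rfl hqb (fuel + 1) i hii
      rw [hfa]
      refine ⟨?_, ?_, ?_, ?_, ?_⟩
      · exact hrval
      · simp [Array.size_setIfInBounds, ihsz]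
      · intro x k h
        obtain ⟨h1, h2⟩ := ihc x k h
        obtain ⟨h3, h4⟩ := hcmp x k h2
        exact ⟨by rw [h3, h1], h4⟩
      · intro y
        rw [hcrt y, ihrt y]
      · intro y hy
        rw [Array.size_setIfInBounds] at hy ⊢
        rw [pg_set]
        by_cases hc : y = i ∧ i < q1.size
        · rw [if_pos hc, ihsz]
          exact hrlt
        · rw [if_neg hc, ihsz]
          rw [ihsz] at hy
          have := ihb y (by rw [ihsz]; exact hy)
          rw [ihsz] at this
          exact this

-- ---- Section 5: the simulation invariant between DSU state and the labels list ----

theorem count_map_replace (lu lv : Nat) (hne : lu ≠ lv) :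
    ∀ (L : List Nat) (c : Nat),
      (L.map (fun l => if l = lv then lu else l)).count c =
        if c = lu then L.count lu + L.count lv else if c = lv then 0 else L.count c := by
  intro L
  induction L with
  | nil => intro c; simp
  | cons x t ih =>
    intro c
    simp only [List.map_cons, List.count_cons, ih c]
    by_cases hxv : x = lv <;> by_cases hcu : c = lu <;> by_cases hcv : c = lv <;>
      by_cases hxc : x = c <;> simp_all <;> omega

theorem getD_map_lt {f : Nat → Nat} (L : List Nat) (i : Nat) (h : i < L.length) :
    (L.map f).getD i 0 = f (L.getD i 0) := by
  rw [List.getD_eq_getElem _ _ (by simpa using h), List.getD_eq_getElem _ _ h]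
  simp

theorem getD_mem (L : List Nat) (i : Nat) (h : i < L.length) : L.getD i 0 ∈ L := by
  rw [List.getD_eq_getElem _ _ h]
  exact List.getElem_mem h

structure DInv (n : Nat) (q : Array Nat) (s : Array Int) (L : List Nat) : Prop where
  hq : q.size = n
  hs : s.size = n
  hL : L.length = n
  hqb : ∀ x, x < n → pg q x < n
  hdep : ∀ x, x < n → ∃ k, k < L.count (L.getD x 0) ∧ isRt q (itp q k x)
  hcls : ∀ i j, i < n → j < n →
    ((∃ r, RootR q i r ∧ RootR q j r) ↔ L.getD i 0 = L.getD j 0)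
  hsz : ∀ r, r < n → isRt q r → s.getD r 0 = (L.count (L.getD r 0) : Int)
  hLb : ∀ i, i < n → L.getD i 0 < n

theorem DInv.fixN {n q s L} (hI : DInv n q s L) : ∀ x, isRt q (itp q q.size x) := by
  intro x
  by_cases hx : x < n
  · obtain ⟨k, hk, hfix⟩ := hI.hdep x hx
    have hkn : k ≤ q.size := by
      have := List.count_le_length (l := L) (a := L.getD x 0)
      rw [hI.hL] at this
      rw [hI.hq]
      omega
    exact (fix_mono q x hfix hkn).2
  · have : isRt q x := by
      unfold isRt
      exact pg_oob q x (by rw [hI.hq]; omega)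
    rw [itp_fix q x this]
    exact this

theorem DInv.reach {n q s L} (hI : DInv n q s L) : ∀ x, ∃ r, RootR q x r :=
  fun x => ⟨itp q q.size x, q.size, rfl, hI.fixN x⟩

theorem DInv.rootlt {n q s L} (hI : DInv n q s L) {x r : Nat} (hx : x < n)
    (h : RootR q x r) : r < n := by
  obtain ⟨k, hk, _⟩ := h
  rw [← hk]
  exact itp_lt q n hI.hq hI.hqb k x hx

theorem rootr_iff (q q' : Array Nat)
    (hc : ∀ x k, isRt q (itp q k x) → itp q' k x = itp q k x ∧ isRt q' (itp q' k x))
    (hreach : ∀ x, ∃ r, RootR q x r) :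
    ∀ x r, RootR q' x r ↔ RootR q x r := by
  have fwd : ∀ x r, RootR q x r → RootR q' x r := by
    rintro x r ⟨k, hk, hr⟩
    obtain ⟨h1, h2⟩ := hc x k (hk ▸ hr)
    refine ⟨k, ?_, ?_⟩
    · rw [h1, hk]
    · rw [h1, hk] at h2
      exact h2
  intro x r
  constructor
  · intro h'
    obtain ⟨r0, hr0⟩ := hreach x
    have h0' := fwd x r0 hr0
    have : r = r0 := root_unique q' x r r0 h' h0'
    rw [this]
    exact hr0
  · exact fwd x r

-- running find preserves the invariant (same sizes array, same labels)
theorem find_inv {n q s L} (hI : DInv n q s L) (i : Nat) :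
    DInv n (findA q.size q i).1 s L ∧
    (∀ x r, RootR (findA q.size q i).1 x r ↔ RootR q x r) ∧
    (∀ y, isRt (findA q.size q i).1 y ↔ isRt q y) ∧
    RootR q i ((findA q.size q i).2) := by
  have hqb' : ∀ y, y < q.size → pg q y < q.size := by
    intro y hy
    rw [hI.hq] at hy ⊢
    exact hI.hqb y hy
  obtain ⟨hr, hsz, hc, hrt, hb⟩ := find_ok q.size q i (hI.fixN i) hqb'
  have hiff := rootr_iff q (findA q.size q i).1 hc hI.reach
  have hseq : (findA q.size q i).1.size = n := hsz.trans hI.hq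
  refine ⟨?_, hiff, hrt, ?_⟩
  · refine ⟨hseq, hI.hs, hI.hL, ?_, ?_, ?_, ?_, hI.hLb⟩
    · intro x hx
      exact lt_of_lt_of_eq (hb x (lt_of_lt_of_eq hx hseq.symm)) hseq
    · intro x hx
      obtain ⟨k, hk, hfix⟩ := hI.hdep x hx
      obtain ⟨h1, h2⟩ := hc x k hfix
      exact ⟨k, hk, h2⟩
    · intro a b ha hb'
      rw [← hI.hcls a b ha hb']
      constructor
      · rintro ⟨r, h1, h2⟩
        exact ⟨r, (hiff a r).mp h1, (hiff b r).mp h2⟩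
      · rintro ⟨r, h1, h2⟩
        exact ⟨r, (hiff a r).mpr h1, (hiff b r).mpr h2⟩
    · intro r hrn hr'
      exact hI.hsz r hrn ((hrt r).mp hr')
  · rw [hr]
    exact ⟨q.size, rfl, hI.fixN i⟩

theorem getD_set_arr {α : Type} (arr : Array α) (i x : Nat) (v d : α) :
    (arr.setIfInBounds i v).getD x d = if x = i ∧ i < arr.size then v else arr.getD x d := by
  rw [Array.getD_eq_getD_getElem?, Array.getD_eq_getD_getElem?, Array.getElem?_setIfInBounds]
  by_cases h1 : i = x
  · subst h1
    by_cases h2 : i < arr.size <;> simp [h2]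
  · have h1' : ¬ x = i := fun h => h1 h.symm
    simp [h1, h1']

theorem replace_eq_iff (lu lv c d : Nat) (h : lu ≠ lv) :
    ((if c = lv then lu else c) = (if d = lv then lu else d)) ↔
      (c = d ∨ ((c = lu ∨ c = lv) ∧ (d = lu ∨ d = lv))) := by
  split_ifs <;> omega

theorem rootr_self (q : Array Nat) (r : Nat) (h : isRt q r) : RootR q r r := ⟨0, rfl, h⟩

theorem fb_eq_iff (rx ry a b : Nat) (hab : a ≠ b) :
    ((if rx = b then a else rx) = (if ry = b then a else ry)) ↔
      (rx = ry ∨ ((rx = a ∨ rx = b) ∧ (ry = a ∨ ry = b))) := by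
  split_ifs <;> omega

theorem merge_inv {n : Nat} {q2 : Array Nat} {s : Array Int} {L : List Nat}
    (hI2 : DInv n q2 s L) (u v ru rv a b : Nat)
    (hu : u < n) (hv : v < n)
    (hRu : RootR q2 u ru) (hRv : RootR q2 v rv) (hne : ru ≠ rv)
    (hor : (a = ru ∧ b = rv) ∨ (a = rv ∧ b = ru)) :
    DInv n (q2.setIfInBounds b a) (s.setIfInBounds a (s.getD a 0 + s.getD b 0))
      (L.map (fun l => if l = L.getD v 0 then L.getD u 0 else l)) := by
  set lu := L.getD u 0 with hlu
  set lv := L.getD v 0 with hlv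
  set L' := L.map (fun l => if l = lv then lu else l) with hL'
  have hbridge : ∀ x y rx ry, x < n → y < n → RootR q2 x rx → RootR q2 y ry →
      (L.getD x 0 = L.getD y 0 ↔ rx = ry) := by
    intro x y rx ry hx hy hrx hry
    constructor
    · intro hL
      obtain ⟨r', h1, h2⟩ := (hI2.hcls x y hx hy).mpr hL
      rw [root_unique q2 x rx r' hrx h1, root_unique q2 y ry r' hry h2]
    · rintro rfl
      exact (hI2.hcls x y hx hy).mp ⟨rx, hrx, hry⟩
  have hrun : ru < n := hI2.rootlt hu hRu
  have hrvn : rv < n := hI2.rootlt hv hRv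
  have hruRt : isRt q2 ru := by obtain ⟨k, hk, h⟩ := hRu; exact h
  have hrvRt : isRt q2 rv := by obtain ⟨k, hk, h⟩ := hRv; exact h
  have haRt : isRt q2 a := by
    rcases hor with ⟨h1, _⟩ | ⟨h1, _⟩ <;> rw [h1] <;> assumption
  have hbRt : isRt q2 b := by
    rcases hor with ⟨_, h2⟩ | ⟨_, h2⟩ <;> rw [h2] <;> assumption
  have hab : a ≠ b := by
    rcases hor with ⟨h1, h2⟩ | ⟨h1, h2⟩
    · rw [h1, h2]; exact hne
    · rw [h1, h2]; exact hne.symm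
  have han : a < n := by
    rcases hor with ⟨h1, _⟩ | ⟨h1, _⟩ <;> rw [h1] <;> assumption
  have hbn : b < n := by
    rcases hor with ⟨_, h2⟩ | ⟨_, h2⟩ <;> rw [h2] <;> assumption
  have hbs : b < q2.size := by rw [hI2.hq]; exact hbn
  have hlune : lu ≠ lv := by
    intro h
    exact hne ((hbridge u v ru rv hu hv hRu hRv).mp h)
  have hLa : (L.getD a 0 = lu ∧ L.getD b 0 = lv) ∨ (L.getD a 0 = lv ∧ L.getD b 0 = lu) := by
    rcases hor with ⟨h1, h2⟩ | ⟨h1, h2⟩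
    · exact Or.inl ⟨(hbridge a u a ru han hu (rootr_self q2 a haRt) hRu).mpr h1,
        (hbridge b v b rv hbn hv (rootr_self q2 b hbRt) hRv).mpr h2⟩
    · exact Or.inr ⟨(hbridge a v a rv han hv (rootr_self q2 a haRt) hRv).mpr h1,
        (hbridge b u b ru hbn hu (rootr_self q2 b hbRt) hRu).mpr h2⟩
  have hcntu : 1 ≤ L.count lu := by
    rw [List.one_le_count_iff]
    exact getD_mem L u (by rw [hI2.hL]; exact hu)
  have hcntv : 1 ≤ L.count lv := by
    rw [List.one_le_count_iff]
    exact getD_mem L v (by rw [hI2.hL]; exact hv)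
  have hcount' : ∀ c, L'.count c =
      if c = lu then L.count lu + L.count lv else if c = lv then 0 else L.count c :=
    fun c => count_map_replace lu lv hlune L c
  have hgetD' : ∀ x, x < n → L'.getD x 0 = if L.getD x 0 = lv then lu else L.getD x 0 := by
    intro x hx
    rw [hL', getD_map_lt L x (by rw [hI2.hL]; exact hx)]
  -- membership of a class label in {lu, lv} expressed through the q2-root
  have hlab : ∀ z rz, z < n → RootR q2 z rz →
      ((L.getD z 0 = lu ∨ L.getD z 0 = lv) ↔ (rz = a ∨ rz = b)) := by
    intro z rz hz hrz
    have b1 : L.getD z 0 = lu ↔ rz = ru := hbridge z u rz ru hz hu hrz hRu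
    have b2 : L.getD z 0 = lv ↔ rz = rv := hbridge z v rz rv hz hv hrz hRv
    rcases hor with ⟨h1, h2⟩ | ⟨h1, h2⟩ <;> rw [h1, h2, b1, b2] <;> tauto
  set q3 := q2.setIfInBounds b a with hq3
  have hmavoid := mrg_avoid q2 a b haRt hbRt hab
  obtain ⟨haRt3, hmto⟩ := mrg_to_a q2 a b haRt hbRt hab hbs
  have hroots3 := mrg_roots q2 a b hab hbs
  have htrans : ∀ x rx, RootR q2 x rx → RootR q3 x (if rx = b then a else rx) := by
    intro x rx hrx
    by_cases hrb : rx = b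
    · subst hrb
      obtain ⟨k, hk, _⟩ := hrx
      rw [if_pos rfl]
      exact ⟨k + 1, hmto k x hk, haRt3⟩
    · rw [if_neg hrb]
      obtain ⟨k, hk, hr⟩ := hrx
      obtain ⟨h1, h2⟩ := hmavoid k x rx hk hr hrb
      exact ⟨k, h1, h2⟩
  refine ⟨by simp [hq3, hI2.hq], by simp [hI2.hs], by simp [hL', hI2.hL], ?_, ?_, ?_, ?_, ?_⟩
  · -- hqb
    intro x hx
    rw [hq3, pg_set]
    by_cases hc : x = b ∧ b < q2.size
    · rw [if_pos hc]; exact han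
    · rw [if_neg hc]; exact hI2.hqb x hx
  · -- hdep
    intro x hx
    obtain ⟨k, hk, hfix⟩ := hI2.hdep x hx
    set rx := itp q2 k x with hrx
    have hRx : RootR q2 x rx := ⟨k, rfl, hfix⟩
    by_cases hrb : rx = b
    · have hLxm : L.getD x 0 = lu ∨ L.getD x 0 = lv :=
        (hlab x rx hx hRx).mpr (Or.inr hrb)
      have hfix3 : itp q3 (k + 1) x = a := hmto k x (hrx.symm.trans hrb)
      refine ⟨k + 1, ?_, by rw [hfix3]; exact haRt3⟩
      have hLx3 : L'.getD x 0 = lu := by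
        rw [hgetD' x hx]
        rcases hLxm with h | h
        · rw [h, if_neg hlune]
        · rw [h, if_pos rfl]
      rw [hLx3, hcount' lu, if_pos rfl]
      rcases hLxm with h | h <;> rw [h] at hk <;> omega
    · obtain ⟨h1, h2⟩ := hmavoid k x rx rfl hfix hrb
      refine ⟨k, ?_, by rw [h1]; exact h2⟩
      have hbound : L.count (L.getD x 0) ≤ L'.count (L'.getD x 0) := by
        rw [hgetD' x hx]
        by_cases hxlv : L.getD x 0 = lv
        · rw [if_pos hxlv, hcount' lu, if_pos rfl, hxlv]
          omega
        · rw [if_neg hxlv]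
          by_cases hxlu : L.getD x 0 = lu
          · rw [hxlu, hcount' lu, if_pos rfl]
            omega
          · rw [hcount' _, if_neg hxlu, if_neg hxlv]
      omega
  · -- hcls
    intro x y hx hy
    obtain ⟨rx, hRx⟩ := hI2.reach x
    obtain ⟨ry, hRy⟩ := hI2.reach y
    have hRx3 := htrans x rx hRx
    have hRy3 := htrans y ry hRy
    have hlhs : (∃ r, RootR q3 x r ∧ RootR q3 y r) ↔
        (if rx = b then a else rx) = (if ry = b then a else ry) := by
      constructor
      · rintro ⟨r, h1, h2⟩
        rw [root_unique q3 x _ r hRx3 h1, root_unique q3 y _ r hRy3 h2]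
      · intro h
        exact ⟨_, hRx3, h ▸ hRy3⟩
    rw [hlhs, fb_eq_iff rx ry a b hab]
    rw [hgetD' x hx, hgetD' y hy, replace_eq_iff lu lv _ _ hlune]
    have e1 : rx = ry ↔ L.getD x 0 = L.getD y 0 :=
      (hbridge x y rx ry hx hy hRx hRy).symm
    have e2 := hlab x rx hx hRx
    have e3 := hlab y ry hy hRy
    rw [e1, ← e2, ← e3]
  · -- hsz
    intro y hyn hyRt3
    obtain ⟨hyRt2, hyb⟩ := (hroots3 y).mp hyRt3
    rw [getD_set_arr]
    by_cases hya : y = a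
    · subst hya
      rw [if_pos ⟨rfl, by rw [hI2.hs]; exact han⟩]
      rw [hI2.hsz y han haRt, hI2.hsz b hbn hbRt, hgetD' y hyn]
      rcases hLa with ⟨ha1, hb1⟩ | ⟨ha1, hb1⟩
      · rw [ha1, hb1, if_neg hlune, hcount' lu, if_pos rfl]
        push_cast; ring
      · rw [ha1, hb1, if_pos rfl, hcount' lu, if_pos rfl]
        push_cast; ring
    · rw [if_neg (fun hc => hya hc.1)]
      rw [hI2.hsz y hyn hyRt2]
      have hyLnot : ¬ (L.getD y 0 = lu ∨ L.getD y 0 = lv) := by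
        intro h
        rcases (hlab y y hyn (rootr_self q2 y hyRt2)).mp h with h' | h'
        · exact hya h'
        · exact hyb h'
      push_neg at hyLnot
      rw [hgetD' y hyn, if_neg hyLnot.2, hcount' _, if_neg hyLnot.1, if_neg hyLnot.2]
  · -- hLb
    intro x hx
    rw [hgetD' x hx]
    by_cases h : L.getD x 0 = lv
    · rw [if_pos h]
      exact hI2.hLb u hu
    · rw [if_neg h]
      exact hI2.hLb x hx

-- ---- Section 6: one edge, the whole fold, the initial state ----

theorem step_inv {n : Nat} {q : Array Nat} {s : Array Int} {L : List Nat}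
    (hI : DInv n q s L) (u v : Nat) (hu : u < n) (hv : v < n) :
    DInv n (unionA q s u v).1 (unionA q s u v).2 (mergeB L u v) := by
  obtain ⟨hI1, hiff1, hrt1, hRu⟩ := find_inv hI u
  set q1 := (findA q.size q u).1 with hq1
  set ru := (findA q.size q u).2 with hru
  obtain ⟨hI2, hiff2, hrt2, hRv⟩ := find_inv hI1 v
  set q2 := (findA q1.size q1 v).1 with hq2
  set rv := (findA q1.size q1 v).2 with hrv
  have hRu1 : RootR q1 u ru := (hiff1 u ru).mpr hRu
  have hRu2 : RootR q2 u ru := (hiff2 u ru).mpr hRu1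
  have hRv2 : RootR q2 v rv := (hiff2 v rv).mpr hRv
  have hkey : ru = rv ↔ L.getD u 0 = L.getD v 0 := by
    constructor
    · intro h
      exact (hI2.hcls u v hu hv).mp ⟨rv, h ▸ hRu2, hRv2⟩
    · intro h
      obtain ⟨r, h1, h2⟩ := (hI2.hcls u v hu hv).mpr h
      rw [root_unique q2 u ru r hRu2 h1, root_unique q2 v rv r hRv2 h2]
  by_cases heq : ru = rv
  · have hA : unionA q s u v = (q2, s) := by
      unfold unionA
      rw [if_neg (not_not_intro heq)]
    have hB : mergeB L u v = L := by
      unfold mergeB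
      rw [if_pos (hkey.mp heq)]
    rw [hA, hB]
    exact hI2
  · have hB : mergeB L u v = L.map (fun l => if l = L.getD v 0 then L.getD u 0 else l) := by
      unfold mergeB
      rw [if_neg (fun h => heq (hkey.mpr h))]
    rw [hB]
    by_cases hsw : s.getD ru 0 < s.getD rv 0
    · have hA : unionA q s u v =
          (q2.setIfInBounds ru rv, s.setIfInBounds rv (s.getD rv 0 + s.getD ru 0)) := by
        unfold unionA
        rw [if_pos heq, if_pos hsw]
      rw [hA]
      exact merge_inv hI2 u v ru rv rv ru hu hv hRu2 hRv2 heq (Or.inr ⟨rfl, rfl⟩)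
    · have hA : unionA q s u v =
          (q2.setIfInBounds rv ru, s.setIfInBounds ru (s.getD ru 0 + s.getD rv 0)) := by
        unfold unionA
        rw [if_pos heq, if_neg hsw]
      rw [hA]
      exact merge_inv hI2 u v ru rv ru rv hu hv hRu2 hRv2 heq (Or.inl ⟨rfl, rfl⟩)

theorem fold_inv : ∀ (es : List (Int × Nat × Nat)) (n : Nat)
    (st : Array Nat × Array Int) (L : List Nat),
    DInv n st.1 st.2 L → (∀ e ∈ es, e.2.1 < n ∧ e.2.2 < n) →
    DInv n (es.foldl (fun st e => unionA st.1 st.2 e.2.1 e.2.2) st).1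
           (es.foldl (fun st e => unionA st.1 st.2 e.2.1 e.2.2) st).2
           (es.foldl (fun L e => mergeB L e.2.1 e.2.2) L) := by
  intro es
  induction es with
  | nil => intro n st L hI _; exact hI
  | cons e t ih =>
    intro n st L hI hb
    obtain ⟨hu, hv⟩ := hb e (by simp)
    simp only [List.foldl_cons]
    exact ih n (unionA st.1 st.2 e.2.1 e.2.2) (mergeB L e.2.1 e.2.2)
      (step_inv hI e.2.1 e.2.2 hu hv)
      (fun x hx => hb x (List.mem_cons_of_mem _ hx))

theorem pg_range (n x : Nat) : pg (Array.range n) x = x := by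
  by_cases h : x < n
  · unfold pg
    rw [Array.getD_eq_getD_getElem?, Array.getElem?_eq_getElem (by simpa using h)]
    simp [Array.getElem_range]
  · exact pg_oob _ _ (by simpa using h)

theorem init_inv (n : Nat) : DInv n (Array.range n) (Array.replicate n (1 : Int)) (List.range n) := by
  have hrt : ∀ x, isRt (Array.range n) x := fun x => pg_range n x
  have hitp : ∀ k x, itp (Array.range n) k x = x := fun k x => itp_fix _ x (hrt x) k
  have hgetD : ∀ x, x < n → (List.range n).getD x 0 = x := by
    intro x hx
    rw [List.getD_eq_getElem _ _ (by simpa using hx)]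
    simp
  have hcnt : ∀ x, x < n → (List.range n).count x = 1 := by
    intro x hx
    exact List.count_eq_one_of_mem List.nodup_range (List.mem_range.mpr hx)
  refine ⟨by simp, by simp, by simp, ?_, ?_, ?_, ?_, ?_⟩
  · intro x hx; rw [pg_range]; exact hx
  · intro x hx
    exact ⟨0, by rw [hgetD x hx, hcnt x hx]; omega, hrt x⟩
  · intro i j hi hj
    rw [hgetD i hi, hgetD j hj]
    constructor
    · rintro ⟨r, ⟨k1, hk1, _⟩, ⟨k2, hk2, _⟩⟩
      rw [hitp] at hk1 hk2
      exact hk1.trans hk2.symm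
    · rintro rfl
      exact ⟨i, rootr_self _ i (hrt i), rootr_self _ i (hrt i)⟩
  · intro r hr _
    rw [hgetD r hr, hcnt r hr]
    rw [Array.getD_eq_getD_getElem?, Array.getElem?_eq_getElem (by simpa using hr)]
    simp
  · intro i hi
    rw [hgetD i hi]
    exact hi

-- ---- Section 7: extracting the sorted component sizes ----

theorem foldl_append_ite {p : Nat → Prop} [DecidablePred p] (f : Nat → Int) :
    ∀ (l : List Nat) (acc : List Int),
      l.foldl (fun acc x => if p x then acc ++ [f x] else acc) acc =
        acc ++ (l.filter (fun x => decide (p x))).map f := by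
  intro l
  induction l with
  | nil => intro acc; simp
  | cons x t ih =>
    intro acc
    by_cases h : p x
    · rw [List.foldl_cons, if_pos h, ih]
      simp [List.filter_cons, h]
    · rw [List.foldl_cons, if_neg h, ih]
      simp [List.filter_cons, h]

theorem filterMap_ite {p : Nat → Prop} [DecidablePred p] (g : Nat → Int) :
    ∀ (l : List Nat),
      l.filterMap (fun x => if p x then some (g x) else none) =
        (l.filter (fun x => decide (p x))).map g := by
  intro l
  induction l with
  | nil => simp
  | cons x t ih =>
    by_cases h : p x <;>
      simp [List.filterMap_cons, List.filter_cons, h, ih]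

theorem extract_perm {n : Nat} {q : Array Nat} {s : Array Int} {L : List Nat} (hI : DInv n q s L) :
    (((List.range n).filter (fun l => decide (l ∈ L))).map (fun l => (L.count l : Int))).Perm
      (((List.range n).filter (fun i => decide (q.getD i i = i))).map (fun i => s.getD i 0)) := by
  set R := (List.range n).filter (fun i => decide (q.getD i i = i)) with hR
  set Lam := (List.range n).filter (fun l => decide (l ∈ L)) with hLam
  have hmemR : ∀ r, r ∈ R ↔ (r < n ∧ isRt q r) := by
    intro r
    rw [hR, List.mem_filter, List.mem_range]
    simp [isRt, pg]
  have hmemLam : ∀ l, l ∈ Lam ↔ (l < n ∧ l ∈ L) := by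
    intro l
    rw [hLam, List.mem_filter, List.mem_range]
    simp
  have hRnd : R.Nodup := List.nodup_range.filter _
  have hLamnd : Lam.Nodup := List.nodup_range.filter _
  set phi := fun r : Nat => L.getD r 0 with hphi
  have hinj : ∀ x ∈ R, ∀ y ∈ R, phi x = phi y → x = y := by
    intro x hx y hy hxy
    obtain ⟨hxn, hxr⟩ := (hmemR x).mp hx
    obtain ⟨hyn, hyr⟩ := (hmemR y).mp hy
    obtain ⟨r, h1, h2⟩ := (hI.hcls x y hxn hyn).mpr hxy
    exact (root_unique q x x r (rootr_self q x hxr) h1).trans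
      (root_unique q y y r (rootr_self q y hyr) h2).symm
  have hmapnd : (R.map phi).Nodup := List.Nodup.map_on hinj hRnd
  have hmm : ∀ z, z ∈ R.map phi ↔ z ∈ Lam := by
    intro z
    rw [List.mem_map]
    constructor
    · rintro ⟨r, hr, rfl⟩
      obtain ⟨hrn, hrt⟩ := (hmemR r).mp hr
      exact (hmemLam _).mpr ⟨hI.hLb r hrn, getD_mem L r (by rw [hI.hL]; exact hrn)⟩
    · intro hz
      obtain ⟨hzn, hzL⟩ := (hmemLam z).mp hz
      obtain ⟨j, hj, hLj⟩ := List.getElem_of_mem hzL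
      have hjn : j < n := by rw [hI.hL] at hj; exact hj
      obtain ⟨k, hk, hfix⟩ := hI.hdep j hjn
      set r := itp q k j with hr
      have hRr : RootR q j r := ⟨k, rfl, hfix⟩
      have hrn : r < n := hI.rootlt hjn hRr
      refine ⟨r, (hmemR r).mpr ⟨hrn, hfix⟩, ?_⟩
      have : L.getD r 0 = L.getD j 0 :=
        (hI.hcls r j hrn hjn).mp ⟨r, rootr_self q r hfix, hRr⟩
      rw [hphi]
      simp only [this]
      rw [List.getD_eq_getElem _ _ hj, hLj]
  have hperm : Lam.Perm (R.map phi) :=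
    (List.perm_ext_iff_of_nodup hLamnd hmapnd).mpr (fun z => (hmm z).symm)
  have hAlist : R.map (fun i => s.getD i 0) = (R.map phi).map (fun l => (L.count l : Int)) := by
    rw [List.map_map]
    apply List.map_congr_left
    intro r hr
    obtain ⟨hrn, hrt⟩ := (hmemR r).mp hr
    exact hI.hsz r hrn hrt
  rw [hAlist]
  exact hperm.map _

theorem sorted_rev_eq_of_perm (xs ys : List Int) (h : xs.Perm ys) :
    PySem.List.sorted xs (fun x => x) true = PySem.List.sorted ys (fun x => x) true := by
  apply PySem.List.eq_of_perm_of_pairwise_le_of_injective (key := (Neg.neg : Int → Int)) neg_injective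
  · exact ((PySem.List.sorted_perm xs _ _).trans h).trans (PySem.List.sorted_perm ys _ _).symm
  · exact (PySem.List.sorted_pairwise_rev xs (fun x => x)).imp (fun h => by omega)
  · exact (PySem.List.sorted_pairwise_rev ys (fun x => x)).imp (fun h => by omega)

theorem solve_eq_alt : ∀ (input_data : String) (connection_limit : Int),
    Pre_solve input_data connection_limit →
    solve input_data connection_limit = solve_alt input_data connection_limit := by
  intro input_data connection_limit hP
  unfold Pre_solve at hP
  unfold solve solve_alt
  rw [parsePoints_eq _ hP]
  rcases hpp : parsePointsB (PySem.Chars.splitOn (PySem.Chars.strip input_data.toList) ['\n'])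
    with _ | points
  · rfl
  · dsimp only
    rw [buildPairs_eq]
    rw [connectA_eq_take]
    rw [PySem.List.slice_to _ (le_max_left 0 connection_limit)]
    have hmax : (max 0 connection_limit).toNat = (connection_limit - 0).toNat := by omega
    rw [hmax]
    set n := points.length with hn
    set edges := PySem.List.sorted (buildPairsB points n) (fun t => t.1) with hedges
    set sel := edges.take (connection_limit - 0).toNat with hsel
    have hbnd : ∀ e ∈ sel, e.2.1 < n ∧ e.2.2 < n := by
      intro e he
      have h1 : e ∈ edges := List.mem_of_mem_take he
      have h2 : e ∈ buildPairsB points n := (PySem.List.mem_sorted _ _ _ _).mp h1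
      unfold buildPairsB at h2
      obtain ⟨i, hiMem, hMap⟩ := List.mem_flatMap.mp h2
      obtain ⟨j, hjMem, heq⟩ := List.mem_map.mp hMap
      rw [List.mem_range] at hiMem
      rw [List.mem_range'_1] at hjMem
      rw [← heq]
      refine ⟨?_, ?_⟩ <;> dsimp only <;> omega
    have hF := fold_inv sel n (Array.range n, Array.replicate n (1 : Int)) (List.range n)
      (init_inv n) hbnd
    have hperm := extract_perm hF
    have hsorted := sorted_rev_eq_of_perm _ _ hperm
    rw [foldl_append_ite, filterMap_ite, List.nil_append, ← hsorted]

-- ===== VERDICT (by name: the statement is the Claim_ definition above) =====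
theorem solve_spec : Claim_equal_solve := by
  intro input_data connection_limit _hD hP
  exact solve_eq_alt input_data connection_limit hP
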